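-- pv_equiv track=rewrite | github.com/Mdominykas/ComplexGeometrySolver | computational/Parser.py | divide_to_lexemes
-- ===== SOURCE A (Python) =====
-- def divide_to_lexemes(line):
--     special_chars = ['=', '(', ')', ',', '.']
--     split_chars = [' ', '\t']
--     lexemes = []
--     cur = []
--
--     def append_cur(cr, lex):
--         if len(cr) > 0:
--             lex.append(''.join(cr))
--         cr.clear()
--
--     for c in line:
--         if c in split_chars:
--             append_cur(cur, lexemes)
--         elif c in special_chars:
--             append_cur(cur, lexemes)
--             lexemes.append(''.join([c]))
--         else:
--             cur.append(c)
--     append_cur(cur, lexemes)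
--     return lexemes
-- ===== SOURCE B (Python) =====
-- def divide_to_lexemes(line):
--     out = []
--     i, n = 0, len(line)
--     while i < n:
--         c = line[i]
--         if c in ' \t':
--             i += 1
--         elif c in '=(),.':
--             out.append(c)
--             i += 1
--         else:
--             j = i + 1
--             while j < n and line[j] not in '=(),. \t':
--                 j += 1
--             out.append(line[i:j])
--             i = j
--     return out
-- ===== Notes on version B (the rewrite author's own statement) =====
-- stated objective: alternative
-- what changed: Replaced the char-by-char accumulate/flush loop with a pending buffer by a cursor that emits each maximal word run via one inner scan plus a slice, keeping no buffer or flush helper.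
import Mathlib
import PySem

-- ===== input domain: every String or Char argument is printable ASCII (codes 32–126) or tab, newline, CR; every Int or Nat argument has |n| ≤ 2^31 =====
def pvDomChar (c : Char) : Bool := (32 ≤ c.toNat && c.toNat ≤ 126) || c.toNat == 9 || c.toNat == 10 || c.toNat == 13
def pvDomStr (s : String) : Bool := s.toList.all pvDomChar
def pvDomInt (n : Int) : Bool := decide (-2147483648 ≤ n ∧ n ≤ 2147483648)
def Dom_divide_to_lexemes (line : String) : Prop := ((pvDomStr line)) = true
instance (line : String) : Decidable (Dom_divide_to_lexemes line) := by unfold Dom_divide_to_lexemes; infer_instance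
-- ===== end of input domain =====

-- B replaces A's accumulate/flush buffer loop by a cursor emitting maximal word runs (alternative, same cost).

-- ===== PORT A =====
def pvIsSplit (c : Char) : Bool := c = ' ' || c = '\t'
def pvIsSpecial (c : Char) : Bool := c = '=' || c = '(' || c = ')' || c = ',' || c = '.'

-- append_cur: flush the buffer into lexemes if nonempty
def pvAppendCur (lex : List String) (cur : List Char) : List String :=
  if cur.length > 0 then lex ++ [String.mk cur] else lex

def pvStepA (st : List String × List Char) (c : Char) : List String × List Char :=
  if pvIsSplit c then (pvAppendCur st.1 st.2, [])
  else if pvIsSpecial c then (pvAppendCur st.1 st.2 ++ [String.mk [c]], [])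
  else (st.1, st.2 ++ [c])

def divide_to_lexemes (line : String) : List String :=
  let st := line.toList.foldl pvStepA ([], [])
  pvAppendCur st.1 st.2

-- ===== PORT B =====
-- word char: neither special nor split
def pvWordChar (c : Char) : Bool := !(pvIsSplit c || pvIsSpecial c)

-- B's cursor loop over the rest of the line; the inner 'while … not in' scan over
-- line[i+1:j] is the takeWhile/dropWhile split (exact: same maximal run).
def pvAltGo : List Char → List String
  | [] => []
  | c :: cs =>
    if pvIsSplit c then pvAltGo cs
    else if pvIsSpecial c then String.mk [c] :: pvAltGo cs
    else String.mk (c :: cs.takeWhile pvWordChar) :: pvAltGo (cs.dropWhile pvWordChar)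
termination_by l => l.length
decreasing_by
  all_goals (have := List.length_dropWhile_le (p := pvWordChar) (l := cs); simp; try omega)

def divide_to_lexemes_alt (line : String) : List String :=
  pvAltGo line.toList

-- ===== PRECONDITION & SPEC =====
def Spec_divide_to_lexemes (line : String) (out : List String) : Prop := out = divide_to_lexemes_alt line
instance (line : String) (out : List String) : Decidable (Spec_divide_to_lexemes line out) := by unfold Spec_divide_to_lexemes; infer_instance

-- ===== CLAIM (what is proved, stated in full; the proofs are below) =====
def Claim_equal_divide_to_lexemes : Prop := ∀ (line : String), Dom_divide_to_lexemes line → Spec_divide_to_lexemes line (divide_to_lexemes line)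

-- ===== LEMMAS AND PROOFS =====

-- B's result when a nonempty word buffer 'cur' is pending in A's state
def pvAltCur (cur : List Char) (cs : List Char) : List String :=
  String.mk (cur ++ cs.takeWhile pvWordChar) :: pvAltGo (cs.dropWhile pvWordChar)

theorem pvMain : ∀ (cs : List Char) (lex : List String) (cur : List Char),
    pvAppendCur (cs.foldl pvStepA (lex, cur)).1 (cs.foldl pvStepA (lex, cur)).2
      = lex ++ (if cur = [] then pvAltGo cs else pvAltCur cur cs) := by
  intro cs
  induction cs with
  | nil =>
    intro lex cur
    cases cur with
    | nil => simp [pvAppendCur, pvAltGo]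
    | cons a t => simp [pvAppendCur, pvAltCur, pvAltGo]
  | cons c cs ih =>
    intro lex cur
    by_cases hs : pvIsSplit c = true
    · have h1 : (c :: cs).foldl pvStepA (lex, cur) = cs.foldl pvStepA (pvAppendCur lex cur, []) := by
        simp [List.foldl, pvStepA, hs]
      rw [h1, ih]
      cases cur with
      | nil => simp [pvAppendCur, pvAltGo, hs]
      | cons a t =>
        simp [pvAppendCur, pvAltCur, pvAltGo, hs, List.takeWhile, List.dropWhile,
              pvWordChar]
    · by_cases hp : pvIsSpecial c = true
      · have h1 : (c :: cs).foldl pvStepA (lex, cur)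
            = cs.foldl pvStepA (pvAppendCur lex cur ++ [String.mk [c]], []) := by
          simp [List.foldl, pvStepA, hs, hp]
        rw [h1, ih]
        cases cur with
        | nil => simp [pvAppendCur, pvAltGo, hs, hp]
        | cons a t =>
          simp [pvAppendCur, pvAltCur, pvAltGo, hs, hp, List.takeWhile, List.dropWhile,
                pvWordChar]
      · have hw : pvWordChar c = true := by simp [pvWordChar, hs, hp]
        have h1 : (c :: cs).foldl pvStepA (lex, cur) = cs.foldl pvStepA (lex, cur ++ [c]) := by
          simp [List.foldl, pvStepA, hs, hp]
        rw [h1, ih]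
        have hne : cur ++ [c] ≠ [] := by simp
        rw [if_neg hne]
        cases cur with
        | nil =>
          simp [pvAltCur, pvAltGo, hs, hp]
        | cons a t =>
          have hne2 : (a :: t) ≠ ([] : List Char) := by simp
          rw [if_neg hne2]
          simp [pvAltCur, List.takeWhile, List.dropWhile, hw]

-- ===== VERDICT (by name: the statement is the Claim_ definition above) =====
theorem divide_to_lexemes_spec : Claim_equal_divide_to_lexemes := by
  intro line _
  unfold Spec_divide_to_lexemes divide_to_lexemes divide_to_lexemes_alt
  have := pvMain line.toList [] []
  simpa using this
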